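-- pv_equiv track=rewrite | github.com/qstonkr/axiomedge | src/agentic/tools/qdrant_search.py | _resolve_kb_id
-- ===== SOURCE A (Python) =====
-- from typing import Any
--
-- def _resolve_kb_id(
--     requested: str, active_kbs: list[dict[str, Any]] | None,
-- ) -> str | None:
--     """LLM 이 변형해서 보낸 kb_id 를 active KB 의 진짜 id 로 보정.
--
--     매칭 우선순위:
--       1. exact (case-insensitive)
--       2. requested 가 active id 의 substring 또는 그 반대
--          예: 'espa' → 'g-espa', 'home_shopping_AX' → 'hax' (역은 안 됨)
--       3. hyphen/underscore 무시 비교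
--          예: 'home-shopping-ax' → 'hax' 는 안 되지만 'g_espa' → 'g-espa' 는 됨
--
--     못 찾으면 None — 호출자가 unresolved list 로 노출.
--     """
--     if not requested or active_kbs is None:
--         return None
--     req = requested.strip().lower()
--     if not req:
--         return None
--     # 1. exact (case-insensitive)
--     for kb in active_kbs:
--         kid = (kb.get("id") or kb.get("kb_id") or "")
--         if kid.lower() == req:
--             return kid
--     # 2. substring (양방향)
--     for kb in active_kbs:
--         kid = (kb.get("id") or kb.get("kb_id") or "")
--         kid_l = kid.lower()
--         if req in kid_l or kid_l in req:
--             return kid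
--     # 3. hyphen/underscore 무시 비교
--     req_norm = req.replace("-", "").replace("_", "")
--     for kb in active_kbs:
--         kid = (kb.get("id") or kb.get("kb_id") or "")
--         kid_norm = kid.lower().replace("-", "").replace("_", "")
--         if req_norm == kid_norm:
--             return kid
--     return None
-- ===== SOURCE B (Python) =====
-- def _resolve_kb_id(requested, active_kbs):
--     """Single pass: short-circuit on exact match, record first substring and
--     first hyphen/underscore-normalised candidates, pick by tier at the end."""
--     if not requested or active_kbs is None:
--         return None
--     req = requested.strip().lower()
--     if not req:
--         return None
--     req_norm = req.replace("-", "").replace("_", "")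
--     sub = None
--     nrm = None
--     for kb in active_kbs:
--         kid = (kb.get("id") or kb.get("kb_id") or "")
--         kid_l = kid.lower()
--         if kid_l == req:
--             return kid
--         if sub is None and (req in kid_l or kid_l in req):
--             sub = kid
--         elif nrm is None and req_norm == kid_l.replace("-", "").replace("_", ""):
--             nrm = kid
--     return sub if sub is not None else nrm
-- ===== Notes on version B (the rewrite author's own statement) =====
-- stated objective: simpler
-- what changed: Replaced A's three sequential scans over active_kbs (exact, then substring, then hyphen/underscore-normalised) by a single pass that returns immediately on an exact match and records the first substring and first normalised candidates, choosing by tier after the loop.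
import Mathlib
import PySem

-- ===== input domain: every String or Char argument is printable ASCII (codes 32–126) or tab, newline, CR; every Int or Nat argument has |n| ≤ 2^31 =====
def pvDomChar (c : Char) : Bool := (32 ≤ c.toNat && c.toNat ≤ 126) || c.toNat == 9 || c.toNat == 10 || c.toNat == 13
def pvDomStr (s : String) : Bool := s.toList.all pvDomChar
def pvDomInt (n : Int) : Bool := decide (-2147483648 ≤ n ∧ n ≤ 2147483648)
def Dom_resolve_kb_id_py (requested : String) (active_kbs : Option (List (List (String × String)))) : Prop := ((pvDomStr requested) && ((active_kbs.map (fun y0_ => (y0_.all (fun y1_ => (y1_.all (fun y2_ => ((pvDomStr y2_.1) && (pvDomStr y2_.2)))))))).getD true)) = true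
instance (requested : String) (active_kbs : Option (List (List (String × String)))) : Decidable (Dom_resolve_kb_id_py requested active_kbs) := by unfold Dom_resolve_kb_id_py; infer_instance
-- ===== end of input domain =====

-- B replaces A's three sequential scans over active_kbs by a single pass that
-- short-circuits on an exact match and records the first substring / first
-- normalised candidate; objective: simpler (one traversal, same O(n) cost).

-- shared helper: kid = (kb.get("id") or kb.get("kb_id") or "")
def pvKid (kb : List (String × String)) : String :=
  let a := (PySem.Dict.mk kb).getD "id" ""
  if a ≠ "" then a else (PySem.Dict.mk kb).getD "kb_id" ""

-- shared helper: s.replace("-", "").replace("_", "")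
def pvNorm (s : String) : String :=
  PySem.Str.replace (PySem.Str.replace s "-" "") "_" ""

-- ===== PORT A =====
def pvPass1 (req : String) : List (List (String × String)) → Option String
  | [] => none
  | kb :: rest =>
    let kid := pvKid kb
    if PySem.Str.lower kid = req then some kid else pvPass1 req rest

def pvPass2 (req : String) : List (List (String × String)) → Option String
  | [] => none
  | kb :: rest =>
    let kid := pvKid kb
    let kid_l := PySem.Str.lower kid
    if PySem.Str.isIn req kid_l || PySem.Str.isIn kid_l req then some kid
    else pvPass2 req rest

def pvPass3 (req_norm : String) : List (List (String × String)) → Option String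
  | [] => none
  | kb :: rest =>
    let kid := pvKid kb
    let kid_norm := pvNorm (PySem.Str.lower kid)
    if req_norm = kid_norm then some kid else pvPass3 req_norm rest

def resolve_kb_id_py (requested : String) (active_kbs : Option (List (List (String × String)))) : Option String :=
  if requested = "" then none else
  match active_kbs with
  | none => none
  | some kbs =>
    let req := PySem.Str.lower (PySem.Str.strip requested)
    if req = "" then none else
    match pvPass1 req kbs with
    | some kid => some kid
    | none =>
      match pvPass2 req kbs with
      | some kid => some kid
      | none => pvPass3 (pvNorm req) kbs

-- ===== PORT B =====
def pvLoopB (req req_norm : String) : List (List (String × String)) → Option String → Option String → Option String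
  | [], sub, nrm => match sub with | some s => some s | none => nrm
  | kb :: rest, sub, nrm =>
    let kid := pvKid kb
    let kid_l := PySem.Str.lower kid
    if kid_l = req then some kid
    else if sub = none ∧ (PySem.Str.isIn req kid_l || PySem.Str.isIn kid_l req) then
      pvLoopB req req_norm rest (some kid) nrm
    else if nrm = none ∧ req_norm = pvNorm kid_l then
      pvLoopB req req_norm rest sub (some kid)
    else pvLoopB req req_norm rest sub nrm

def resolve_kb_id_py_alt (requested : String) (active_kbs : Option (List (List (String × String)))) : Option String :=
  if requested = "" then none else
  match active_kbs with
  | none => none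
  | some kbs =>
    let req := PySem.Str.lower (PySem.Str.strip requested)
    if req = "" then none else
    pvLoopB req (pvNorm req) kbs none none

-- ===== PRECONDITION & SPEC =====
def Spec_resolve_kb_id_py (requested : String) (active_kbs : Option (List (List (String × String)))) (out : Option String) : Prop := out = resolve_kb_id_py_alt requested active_kbs
instance (requested : String) (active_kbs : Option (List (List (String × String)))) (out : Option String) : Decidable (Spec_resolve_kb_id_py requested active_kbs out) := by unfold Spec_resolve_kb_id_py; infer_instance

-- ===== CLAIM (what is proved, stated in full; the proofs are below) =====
def Claim_equal_resolve_kb_id_py : Prop := ∀ (requested : String) (active_kbs : Option (List (List (String × String)))), Dom_resolve_kb_id_py requested active_kbs → Spec_resolve_kb_id_py requested active_kbs (resolve_kb_id_py requested active_kbs)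

-- ===== LEMMAS AND PROOFS =====

-- loop invariant: B's one-pass fold equals A's three tiers with the pending candidates spliced in
lemma pvLoopB_eq (req req_norm : String) (L : List (List (String × String))) (sub nrm : Option String) :
    pvLoopB req req_norm L sub nrm =
      match pvPass1 req L with
      | some k => some k
      | none =>
        match sub with
        | some s => some s
        | none =>
          match pvPass2 req L with
          | some k => some k
          | none =>
            match nrm with
            | some n => some n
            | none => pvPass3 req_norm L := by
  induction L generalizing sub nrm with
  | nil =>
    cases sub <;> cases nrm <;> simp [pvLoopB, pvPass1, pvPass2, pvPass3]
  | cons kb rest ih =>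
    cases sub <;> cases nrm <;>
      simp only [pvLoopB, pvPass1, pvPass2, pvPass3] <;>
      split_ifs <;>
      simp_all

-- ===== VERDICT (by name: the statement is the Claim_ definition above) =====
theorem resolve_kb_id_py_spec : Claim_equal_resolve_kb_id_py := by
  intro requested active_kbs _
  unfold Spec_resolve_kb_id_py resolve_kb_id_py resolve_kb_id_py_alt
  by_cases h0 : requested = ""
  · simp [h0]
  · simp only [h0, if_false]
    cases active_kbs with
    | none => rfl
    | some kbs =>
      by_cases h1 : PySem.Str.lower (PySem.Str.strip requested) = ""
      · simp [h1]
      · simp only [h1, if_false, pvLoopB_eq]
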